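-- pv_equiv track=rewrite | github.com/Chiaerae/LC | PROGRAMMA1/programma1.py | EstraiSequenza
-- ===== SOURCE A (Python) =====
-- def EstraiSequenza(tokensPOS):
--      ListaPosVerbi = [] #Lista in cui inserisco i verbi
--      ListaVerbi = ["VB","VBD","VBG","VBN","VBZ"]  #creo una lista con tutti i pos tag verbi
--      ListaSostantivi = ["NN", "NNS", "NNP", "NNPS"]#creo una lista con tutti i pos tag dei sostantivi
--      ListaAvverbi = ["RB","RBR","RBS"]#creo una lista con tutti i pos tag degli avverbi
--      ListaAggettivi = ["JJ", "JJR","JJS"]#creo una lista con tutti i pos tag degli aggettivi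
--      ListaPosAggettivi = [] #Lista in cui inserisco gli aggettivi
--      ListaPosSostantivi = [] #Lista in cui inserisco i sostantivi
--      ListaPosAvverbi = [] #Listain cui inserisco gli avverbi
--      for bigramma in tokensPOS:
--           if bigramma[1] in ListaVerbi: #se il bigramma ha come pos uno di quelli nella lista appendo il token alla lista
--                ListaPosVerbi.append(bigramma[0]) #eseguo questo controllo su tutte e quattro le liste
--           elif bigramma[1] in ListaSostantivi:
--                ListaPosSostantivi.append(bigramma[0])
--           elif bigramma[1] in ListaAvverbi:
--                ListaPosAvverbi.append(bigramma[0])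
--           elif bigramma[1] in ListaAggettivi:
--                ListaPosAggettivi.append(bigramma[0])
--
--      return (ListaPosSostantivi, ListaPosVerbi,ListaPosAggettivi,ListaPosAvverbi) #rimando al main le liste che contengono rispettivamente tutti i sostantivi, tutti i verbi, tutti gli aggettivi
-- ===== SOURCE B (Python) =====
-- def EstraiSequenza(tokensPOS):
--     # Four independent filter passes; correct because the tag sets are disjoint,
--     # so A's elif precedence never changes which list a token lands in.
--     def pick(tags):
--         return [tok for tok, tag in tokensPOS if tag in tags]
--     return (pick(frozenset(["NN", "NNS", "NNP", "NNPS"])),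
--             pick(frozenset(["VB", "VBD", "VBG", "VBN", "VBZ"])),
--             pick(frozenset(["JJ", "JJR", "JJS"])),
--             pick(frozenset(["RB", "RBR", "RBS"])))
-- ===== Notes on version B (the rewrite author's own statement) =====
-- stated objective: alternative
-- what changed: Replaces the single-pass four-way if/elif cascade with four independent filter passes (one list comprehension per category over a frozenset of tags), correct because the tag sets are disjoint.
import Mathlib
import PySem

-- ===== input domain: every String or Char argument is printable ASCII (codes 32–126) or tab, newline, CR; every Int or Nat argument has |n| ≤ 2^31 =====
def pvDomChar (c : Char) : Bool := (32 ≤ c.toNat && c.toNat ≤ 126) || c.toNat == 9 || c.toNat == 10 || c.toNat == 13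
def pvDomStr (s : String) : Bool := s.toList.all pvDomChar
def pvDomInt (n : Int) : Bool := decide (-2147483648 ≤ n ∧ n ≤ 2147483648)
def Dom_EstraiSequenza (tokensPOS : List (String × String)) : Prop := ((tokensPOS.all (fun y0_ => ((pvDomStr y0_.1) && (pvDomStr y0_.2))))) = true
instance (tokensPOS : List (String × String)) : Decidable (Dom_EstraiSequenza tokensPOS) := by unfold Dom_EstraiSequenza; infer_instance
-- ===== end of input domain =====

-- B replaces A's single-pass if/elif cascade with four independent filter passes over the input (objective: alternative; correct since the tag sets are disjoint).


-- ===== PORT A =====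
-- state: (ListaPosSostantivi, ListaPosVerbi, ListaPosAggettivi, ListaPosAvverbi); branch order as in A
def EstraiSequenzaStep (st : List String × List String × List String × List String)
    (bigramma : String × String) : List String × List String × List String × List String :=
  if ["VB","VBD","VBG","VBN","VBZ"].contains bigramma.2 then
    (st.1, st.2.1 ++ [bigramma.1], st.2.2.1, st.2.2.2)
  else if ["NN","NNS","NNP","NNPS"].contains bigramma.2 then
    (st.1 ++ [bigramma.1], st.2.1, st.2.2.1, st.2.2.2)
  else if ["RB","RBR","RBS"].contains bigramma.2 then
    (st.1, st.2.1, st.2.2.1, st.2.2.2 ++ [bigramma.1])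
  else if ["JJ","JJR","JJS"].contains bigramma.2 then
    (st.1, st.2.1, st.2.2.1 ++ [bigramma.1], st.2.2.2)
  else st

def EstraiSequenza (tokensPOS : List (String × String)) : List String × List String × List String × List String :=
  tokensPOS.foldl EstraiSequenzaStep ([], [], [], [])

-- ===== PORT B =====
-- pick tags = [tok for tok, tag in tokensPOS if tag in tags]  (frozenset ported as a distinct-element list)
def EstraiSequenzaPick (tokensPOS : List (String × String)) (tags : List String) : List String :=
  (tokensPOS.filter (fun t => tags.contains t.2)).map Prod.fst

def EstraiSequenza_alt (tokensPOS : List (String × String)) : List String × List String × List String × List String :=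
  (EstraiSequenzaPick tokensPOS ["NN","NNS","NNP","NNPS"],
   EstraiSequenzaPick tokensPOS ["VB","VBD","VBG","VBN","VBZ"],
   EstraiSequenzaPick tokensPOS ["JJ","JJR","JJS"],
   EstraiSequenzaPick tokensPOS ["RB","RBR","RBS"])

-- ===== PRECONDITION & SPEC =====
def Spec_EstraiSequenza (tokensPOS : List (String × String)) (out : List String × List String × List String × List String) : Prop := out = EstraiSequenza_alt tokensPOS
instance (tokensPOS : List (String × String)) (out : List String × List String × List String × List String) : Decidable (Spec_EstraiSequenza tokensPOS out) := by unfold Spec_EstraiSequenza; infer_instance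

-- ===== CLAIM (what is proved, stated in full; the proofs are below) =====
def Claim_equal_EstraiSequenza : Prop := ∀ (tokensPOS : List (String × String)), Dom_EstraiSequenza tokensPOS → Spec_EstraiSequenza tokensPOS (EstraiSequenza tokensPOS)

-- ===== LEMMAS AND PROOFS =====
-- loop invariant: folding A's step from state st appends exactly B's four filters
theorem fold_inv (l : List (String × String)) (st : List String × List String × List String × List String) :
    l.foldl EstraiSequenzaStep st =
      (st.1 ++ EstraiSequenzaPick l ["NN","NNS","NNP","NNPS"],
       st.2.1 ++ EstraiSequenzaPick l ["VB","VBD","VBG","VBN","VBZ"],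
       st.2.2.1 ++ EstraiSequenzaPick l ["JJ","JJR","JJS"],
       st.2.2.2 ++ EstraiSequenzaPick l ["RB","RBR","RBS"]) := by
  induction l generalizing st with
  | nil => simp [EstraiSequenzaPick]
  | cons x xs ih =>
    simp only [List.foldl_cons, ih]
    by_cases hV : (["VB","VBD","VBG","VBN","VBZ"] : List String).contains x.2
    · have hV' := hV; simp only [List.contains_eq_mem, List.mem_cons, decide_eq_true_eq] at hV'
      rcases hV' with h | h | h | h | h | h <;> simp_all [EstraiSequenzaStep, EstraiSequenzaPick]
    · by_cases hN : (["NN","NNS","NNP","NNPS"] : List String).contains x.2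
      · have hN' := hN; simp only [List.contains_eq_mem, List.mem_cons, decide_eq_true_eq] at hN'
        rcases hN' with h | h | h | h | h <;> simp_all [EstraiSequenzaStep, EstraiSequenzaPick]
      · by_cases hR : (["RB","RBR","RBS"] : List String).contains x.2
        · have hR' := hR; simp only [List.contains_eq_mem, List.mem_cons, decide_eq_true_eq] at hR'
          rcases hR' with h | h | h | h <;> simp_all [EstraiSequenzaStep, EstraiSequenzaPick]
        · by_cases hJ : (["JJ","JJR","JJS"] : List String).contains x.2
          · have hJ' := hJ; simp only [List.contains_eq_mem, List.mem_cons, decide_eq_true_eq] at hJ'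
            rcases hJ' with h | h | h | h <;> simp_all [EstraiSequenzaStep, EstraiSequenzaPick]
          · simp_all [EstraiSequenzaStep, EstraiSequenzaPick]

-- ===== VERDICT (by name: the statement is the Claim_ definition above) =====
theorem EstraiSequenza_spec : Claim_equal_EstraiSequenza := by
  intro tokensPOS _
  show EstraiSequenza tokensPOS = EstraiSequenza_alt tokensPOS
  simp [EstraiSequenza, fold_inv, EstraiSequenza_alt]
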